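-- pv_equiv track=rewrite | github.com/taimooralam/job-search | scripts/backfill_preenrich_states.py | _remap_failed_terminal
-- ===== SOURCE A (Python) =====
-- from typing import Any, Optional
--
-- LEGACY_FAILED_TERMINAL = "failed_terminal"
--
-- def _remap_failed_terminal(stage_states: dict[str, Any]) -> Optional[dict[str, Any]]:
--     changed = False
--     updated = {}
--     for name, state in stage_states.items():
--         current = dict(state)
--         if current.get("status") == LEGACY_FAILED_TERMINAL:
--             current["status"] = "deadletter"
--             changed = True
--         updated[name] = current
--     return updated if changed else None
-- ===== SOURCE B (Python) =====
-- from typing import Any, Optional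
--
-- LEGACY_FAILED_TERMINAL = "failed_terminal"
--
-- def _remap_failed_terminal(stage_states: dict[str, Any]) -> Optional[dict[str, Any]]:
--     if not any(state.get("status") == LEGACY_FAILED_TERMINAL
--                for state in stage_states.values()):
--         return None
--     return {
--         name: {**state, "status": "deadletter"}
--               if state.get("status") == LEGACY_FAILED_TERMINAL
--               else dict(state)
--         for name, state in stage_states.items()
--     }
-- ===== Notes on version B (the rewrite author's own statement) =====
-- stated objective: simpler
-- what changed: Replaces A's single interleaved build-and-flag loop with a detect pass (any) that returns None early, followed by a dict comprehension that rebuilds the mapping, remapping legacy statuses.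
import Mathlib
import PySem

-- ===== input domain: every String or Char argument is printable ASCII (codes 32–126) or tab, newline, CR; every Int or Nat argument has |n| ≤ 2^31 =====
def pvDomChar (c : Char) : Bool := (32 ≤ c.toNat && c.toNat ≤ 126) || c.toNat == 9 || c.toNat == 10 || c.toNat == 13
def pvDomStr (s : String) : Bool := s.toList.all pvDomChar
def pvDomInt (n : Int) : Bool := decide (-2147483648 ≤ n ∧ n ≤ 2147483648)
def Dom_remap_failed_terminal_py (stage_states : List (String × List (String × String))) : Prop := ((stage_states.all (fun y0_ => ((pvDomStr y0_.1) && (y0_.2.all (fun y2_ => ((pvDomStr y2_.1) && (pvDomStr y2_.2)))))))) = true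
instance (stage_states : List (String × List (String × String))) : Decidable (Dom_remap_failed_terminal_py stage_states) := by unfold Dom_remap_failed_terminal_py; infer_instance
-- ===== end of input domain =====

-- B splits A's single interleaved build-and-flag loop into a detect pass (any) returning None
-- early, then a comprehension that rebuilds the mapping (objective: simpler).

-- ===== PORT A =====
-- single loop carrying (changed, updated-dict); each state copied, legacy status overwritten
def remap_failed_terminal_py (stage_states : List (String × List (String × String))) : Option (List (String × List (String × String))) :=
  let r := stage_states.foldl
    (fun (acc : Bool × PySem.Dict String (List (String × String))) p =>
      let current := PySem.Dict.mk p.2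
      if current.get? "status" == some "failed_terminal" then
        (true, acc.2.insert p.1 (current.insert "status" "deadletter").items)
      else
        (acc.1, acc.2.insert p.1 current.items))
    (false, PySem.Dict.empty)
  if r.1 then some r.2.items else none

-- ===== PORT B =====
def remap_failed_terminal_py_alt (stage_states : List (String × List (String × String))) : Option (List (String × List (String × String))) :=
  if stage_states.any (fun p => (PySem.Dict.mk p.2).get? "status" == some "failed_terminal") then
    some (stage_states.map (fun p =>
      (p.1,
       if (PySem.Dict.mk p.2).get? "status" == some "failed_terminal" then
         ((PySem.Dict.mk p.2).insert "status" "deadletter").items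
       else
         p.2)))
  else
    none

-- ===== PRECONDITION & SPEC =====
-- Pre_ excludes association lists with duplicate keys (outer or inner): the Python argument is a
-- dict of dicts, which cannot carry duplicate keys, so such lists represent no Python input.
def Pre_remap_failed_terminal_py (stage_states : List (String × List (String × String))) : Prop :=
  (stage_states.map Prod.fst).Nodup ∧ ∀ p ∈ stage_states, (p.2.map Prod.fst).Nodup
instance (stage_states : List (String × List (String × String))) : Decidable (Pre_remap_failed_terminal_py stage_states) := by unfold Pre_remap_failed_terminal_py; infer_instance

def pvWitness_remap_failed_terminal_py : (List (String × List (String × String))) :=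
  [("stage1", [("status", "failed_terminal"), ("k", "v")]), ("stage2", [("status", "ok")])]

def Spec_remap_failed_terminal_py (stage_states : List (String × List (String × String))) (out : Option (List (String × List (String × String)))) : Prop := out = remap_failed_terminal_py_alt stage_states
instance (stage_states : List (String × List (String × String))) (out : Option (List (String × List (String × String)))) : Decidable (Spec_remap_failed_terminal_py stage_states out) := by unfold Spec_remap_failed_terminal_py; infer_instance

-- ===== CLAIM (what is proved, stated in full; the proofs are below) =====
def Claim_equal_remap_failed_terminal_py : Prop := ∀ (stage_states : List (String × List (String × String))), Dom_remap_failed_terminal_py stage_states → Pre_remap_failed_terminal_py stage_states → Spec_remap_failed_terminal_py stage_states (remap_failed_terminal_py stage_states)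

-- ===== LEMMAS AND PROOFS =====

-- the per-entry test and the remapped value, shared vocabulary of both ports
def pvCond (p : String × List (String × String)) : Bool :=
  (PySem.Dict.mk p.2).get? "status" == some "failed_terminal"

def pvVal (p : String × List (String × String)) : List (String × String) :=
  if pvCond p then ((PySem.Dict.mk p.2).insert "status" "deadletter").items else p.2

-- A's loop step equals the componentwise step (flag-or, keyed insert of pvVal)
theorem stepA_eq :
    (fun (acc : Bool × PySem.Dict String (List (String × String))) p =>
      let current := PySem.Dict.mk p.2
      if current.get? "status" == some "failed_terminal" then
        (true, acc.2.insert p.1 (current.insert "status" "deadletter").items)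
      else
        (acc.1, acc.2.insert p.1 current.items))
    = (fun (acc : Bool × PySem.Dict String (List (String × String))) p =>
        (acc.1 || pvCond p, acc.2.insert p.1 (pvVal p))) := by
  funext acc p
  by_cases h : pvCond p = true
  · simp [pvCond, pvVal] at *
    simp [h]
  · simp only [pvCond] at h
    simp [pvVal, pvCond, h]

-- or-folding the flag is List.any
theorem foldl_or_any (l : List (String × List (String × String))) (b : Bool) :
    l.foldl (fun a p => a || pvCond p) b = (b || l.any pvCond) := by
  induction l generalizing b with
  | nil => simp
  | cons x xs ih => simp [List.foldl_cons, ih, Bool.or_assoc]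

theorem remap_failed_terminal_py_spec' (ss : List (String × List (String × String)))
    (hpre : Pre_remap_failed_terminal_py ss) :
    remap_failed_terminal_py ss = remap_failed_terminal_py_alt ss := by
  obtain ⟨hnodup, -⟩ := hpre
  unfold remap_failed_terminal_py remap_failed_terminal_py_alt
  rw [stepA_eq,
      PySem.List.foldl_prod_mk (f := fun a p => a || pvCond p)
        (g := fun (d : PySem.Dict String (List (String × String))) p => d.insert p.1 (pvVal p)),
      foldl_or_any]
  have e1 : (fun p : String × List (String × String) =>
      (PySem.Dict.mk p.2).get? "status" == some "failed_terminal") = pvCond := rfl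
  have e2 : (fun p : String × List (String × String) =>
      (p.1,
       if (PySem.Dict.mk p.2).get? "status" == some "failed_terminal" then
         ((PySem.Dict.mk p.2).insert "status" "deadletter").items
       else
         p.2)) = (fun p => (p.1, pvVal p)) := rfl
  have hitems :
      (ss.foldl (fun (d : PySem.Dict String (List (String × String))) p => d.insert p.1 (pvVal p))
        PySem.Dict.empty ).items
      = ss.map (fun p => (p.1, pvVal p)) := by
    have := PySem.Dict.items_foldl_insert_fresh (l := ss) (k := Prod.fst) (v := pvVal)
      (d := PySem.Dict.empty) (by intro a _; simp) hnodup
    simpa using this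
  rw [e1, e2]
  simp only [Bool.false_or]
  by_cases hany : ss.any pvCond = true
  · simp [hany, hitems]
  · simp [hany]

-- ===== VERDICT (by name: the statement is the Claim_ definition above) =====
theorem remap_failed_terminal_py_spec : Claim_equal_remap_failed_terminal_py := by
  intro ss _ hpre
  exact remap_failed_terminal_py_spec' ss hpre
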